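-- pv_equiv track=rewrite | github.com/YerikZ/Code-Bank | Algorithms/graphs.py | path_search
-- ===== SOURCE A (Python) =====
-- def path_search(start, end, graph):
--     ''' Finds any valid path from a to b in the provided graph.
--     Each node is identified by an integer.
--     The graph is directed : a->b does not imply b->a.
--     Args:
--         - graph is provided as an adjacency list, where graph[x] is
--           a list of integers representing all nodes accessible from x.
--         - node_a and node_b are integers representing the start and end.
--     Return:
--         A list of nodes representing any path from node_a to node_b.
--         The path does not have to be the shortest one.
--         If no path exists, return None.
--     '''
--     def dfs(current, end, graph, visited):
--         if current == end:
--             # Base case: reached the target node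
--             return [current]
--
--         visited.add(current)  # Mark current node as visited
--
--         for neighbor in graph.get(current, []):  # Safely get neighbors
--             if neighbor not in visited:
--                 path = dfs(neighbor, end, graph, visited)
--                 if path:  # If a path is found, prepend current node
--                     return [current] + path
--
--         return None  # No path found from this node
--
--     # Initialize a visited set and call DFS
--     return dfs(start, end, graph, set())
-- ===== SOURCE B (Python) =====
-- def path_search(start, end, graph):
--     '''Iterative DFS: explicit stack of per-node neighbor iterators plus a
--     running path list and a persistent visited set; same path as the
--     recursive version because each frame's iterator resumes where it left off.'''
--     if start == end:
--         return [start]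
--     visited = {start}
--     path = [start]
--     stack = [iter(graph.get(start, []))]
--     while stack:
--         it = stack[-1]
--         advanced = False
--         for n in it:
--             if n in visited:
--                 continue
--             if n == end:
--                 return path + [n]
--             visited.add(n)
--             path.append(n)
--             stack.append(iter(graph.get(n, [])))
--             advanced = True
--             break
--         if not advanced:
--             stack.pop()
--             path.pop()
--     return None
-- ===== Notes on version B (the rewrite author's own statement) =====
-- stated objective: alternative
-- what changed: Replaces the recursive DFS helper by an iterative DFS: an explicit stack of per-node neighbor iterators with a running path list and the same persistent visited set, returning the identical path.
import Mathlib
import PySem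

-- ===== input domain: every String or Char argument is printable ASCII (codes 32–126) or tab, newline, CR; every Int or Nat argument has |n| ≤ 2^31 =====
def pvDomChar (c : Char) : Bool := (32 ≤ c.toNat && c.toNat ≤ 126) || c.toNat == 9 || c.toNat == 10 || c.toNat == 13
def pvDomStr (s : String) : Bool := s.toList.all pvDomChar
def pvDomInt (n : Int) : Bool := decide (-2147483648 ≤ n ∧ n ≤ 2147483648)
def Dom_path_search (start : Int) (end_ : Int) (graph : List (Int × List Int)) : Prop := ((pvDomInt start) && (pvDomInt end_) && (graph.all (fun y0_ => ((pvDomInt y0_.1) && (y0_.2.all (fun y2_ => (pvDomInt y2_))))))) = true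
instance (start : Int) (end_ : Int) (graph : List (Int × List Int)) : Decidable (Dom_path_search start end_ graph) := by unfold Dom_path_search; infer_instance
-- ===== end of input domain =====

-- B replaces A's recursive DFS by an iterative DFS with an explicit stack of per-node
-- neighbor iterators, a running path list and the same persistent visited set (objective:
-- alternative decomposition; same traversal order, hence the same returned path).

-- ===== PORT A =====
-- graph.get(current, []) on the dict argument
def pvAdj (graph : List (Int × List Int)) (n : Int) : List Int :=
  (PySem.Dict.mk graph).getD n []

-- fuel bound shared by both ports (a totality guard only: the recursion depth of A's dfs,
-- and the per-frame depth budget of B's stack, never exceed (Σ adjacency lengths) + 1)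
def pvFuel (graph : List (Int × List Int)) : Nat :=
  (graph.map (·.2.length)).sum

-- the 'for neighbor in graph.get(current, [])' loop of A's dfs, threading the
-- (mutable, persistent) visited set; 'dfs' is the recursive call at the current depth
def pvLoopA (dfs : Int → PySem.Set Int → Option (List Int) × PySem.Set Int) :
    List Int → Int → PySem.Set Int → Option (List Int) × PySem.Set Int
  | [], _, v => (none, v)
  | n :: ns, c, v =>
    if PySem.Set.contains v n then pvLoopA dfs ns c v
    else
      match dfs n v with
      | (some p, v') => (some (c :: p), v')
      | (none, v') => pvLoopA dfs ns c v'

-- A's inner dfs(current, end, graph, visited); fuel only makes the recursion structural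
def pvDfsA (end_ : Int) (graph : List (Int × List Int)) :
    Nat → Int → PySem.Set Int → Option (List Int) × PySem.Set Int
  | f, c, v =>
    if c = end_ then (some [c], v)
    else
      match f with
      | 0 => (none, v)
      | f' + 1 => pvLoopA (pvDfsA end_ graph f') (pvAdj graph c) c (PySem.Set.add v c)

def path_search (start : Int) (end_ : Int) (graph : List (Int × List Int)) :
    Option (List Int) :=
  (pvDfsA end_ graph (pvFuel graph + 1) start PySem.Set.empty).1

-- ===== PORT B =====
-- termination measure for the stack machine: Σ over frames of base^fuel · (|iterator|+1),
-- with base larger than any adjacency list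
def pvBase (graph : List (Int × List Int)) : Nat :=
  2 + (graph.map (·.2.length)).foldr max 0

def pvMeas (graph : List (Int × List Int)) (K : List (Nat × List Int)) : Nat :=
  (K.map (fun fr => pvBase graph ^ fr.1 * (fr.2.length + 1))).sum

theorem pvAdj_len_le (graph : List (Int × List Int)) (n : Int) :
    (pvAdj graph n).length ≤ (graph.map (·.2.length)).foldr max 0 := by
  induction graph with
  | nil => simp [pvAdj, PySem.Dict.getD, PySem.Dict.get?]
  | cons p rest ih =>
    simp only [pvAdj, PySem.Dict.getD] at *
    rw [PySem.Dict.get?_mk_cons]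
    by_cases h : p.1 == n
    · simp [h]
    · simp [h]; exact Or.inr ih

-- B's while loop: frames are (remaining depth budget, not-yet-consumed part of the
-- frame's neighbor iterator); 'path' is B's running path, 'v' the visited set.
def pvRunB (end_ : Int) (graph : List (Int × List Int)) :
    List (Nat × List Int) → List Int → PySem.Set Int → Option (List Int)
  | [], _, _ => none
  | (f, []) :: K, path, v => pvRunB end_ graph K path.dropLast v
  | (f, n :: ns) :: K, path, v =>
    if PySem.Set.contains v n then pvRunB end_ graph ((f, ns) :: K) path v
    else if n = end_ then some (path ++ [n])
    else
      match f with
      | 0 => pvRunB end_ graph ((0, ns) :: K) path v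
      | f' + 1 =>
        pvRunB end_ graph ((f', pvAdj graph n) :: (f' + 1, ns) :: K)
          (path ++ [n]) (PySem.Set.add v n)
  termination_by K _ _ => pvMeas graph K
  decreasing_by
  · have hpos : 0 < pvBase graph ^ f * (0 + 1) :=
      Nat.mul_pos (Nat.pow_pos (by unfold pvBase; omega)) (by omega)
    simp only [pvMeas, List.map_cons, List.sum_cons, List.length_nil]; omega
  · have hmul : pvBase graph ^ f * (ns.length + 1) < pvBase graph ^ f * (ns.length + 1 + 1) :=
      Nat.mul_lt_mul_of_pos_left (by omega) (Nat.pow_pos (by unfold pvBase; omega))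
    simp only [pvMeas, List.map_cons, List.sum_cons, List.length_cons]; omega
  · have hmul : pvBase graph ^ 0 * (ns.length + 1) < pvBase graph ^ 0 * (ns.length + 1 + 1) :=
      Nat.mul_lt_mul_of_pos_left (by omega) (Nat.pow_pos (by unfold pvBase; omega))
    simp only [pvMeas, List.map_cons, List.sum_cons, List.length_cons]; omega
  · have hL := pvAdj_len_le graph n
    have h2 : (pvAdj graph n).length + 1 < pvBase graph := by unfold pvBase; omega
    have hpos : 0 < pvBase graph ^ f' := Nat.pow_pos (by unfold pvBase; omega)
    have hstep : pvBase graph ^ f' * ((pvAdj graph n).length + 1) < pvBase graph ^ (f' + 1) :=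
      lt_of_lt_of_le (Nat.mul_lt_mul_of_pos_left h2 hpos) (le_of_eq (pow_succ _ _).symm)
    have hexp : pvBase graph ^ (f' + 1) * (ns.length + 1 + 1) =
        pvBase graph ^ (f' + 1) * (ns.length + 1) + pvBase graph ^ (f' + 1) := by ring
    simp only [pvMeas, List.map_cons, List.sum_cons, List.length_cons, Nat.succ_eq_add_one]
    omega

def path_search_alt (start : Int) (end_ : Int) (graph : List (Int × List Int)) :
    Option (List Int) :=
  if start = end_ then some [start]
  else
    pvRunB end_ graph [(pvFuel graph, pvAdj graph start)] [start]
      (PySem.Set.add PySem.Set.empty start)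

-- ===== PRECONDITION & SPEC =====
def Spec_path_search (start : Int) (end_ : Int) (graph : List (Int × List Int)) (out : Option (List Int)) : Prop := out = path_search_alt start end_ graph
instance (start : Int) (end_ : Int) (graph : List (Int × List Int)) (out : Option (List Int)) : Decidable (Spec_path_search start end_ graph out) := by unfold Spec_path_search; infer_instance

-- ===== CLAIM (what is proved, stated in full; the proofs are below) =====
def Claim_equal_path_search : Prop := ∀ (start : Int) (end_ : Int) (graph : List (Int × List Int)), Dom_path_search start end_ graph → Spec_path_search start end_ graph (path_search start end_ graph)

-- ===== LEMMAS AND PROOFS =====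

-- Simulation: a frame (f, ns) on top of B's stack, with the running path ending in the
-- node c the frame belongs to, behaves exactly like A's neighbor loop over ns at depth
-- budget f; on failure B resumes the parent frames K with A's final visited set.
theorem pvSim (end_ : Int) (graph : List (Int × List Int)) :
    ∀ (f : Nat) (ns : List Int) (c : Int) (v : PySem.Set Int)
      (P : List Int) (K : List (Nat × List Int)),
      pvRunB end_ graph ((f, ns) :: K) (P ++ [c]) v =
        (match pvLoopA (pvDfsA end_ graph f) ns c v with
         | (some q, _) => some (P ++ q)
         | (none, v') => pvRunB end_ graph K P v') := by
  intro f
  induction f using Nat.strong_induction_on with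
  | _ f ihf =>
    intro ns
    induction ns with
    | nil =>
      intro c v P K
      have hL : pvRunB end_ graph ((f, []) :: K) (P ++ [c]) v =
          pvRunB end_ graph K (P ++ [c]).dropLast v := by
        rw [pvRunB.eq_def]
      rw [hL]
      simp [pvLoopA]
    | cons n ns ihns =>
      intro c v P K
      by_cases hv : n ∈ v
      · have hL : pvRunB end_ graph ((f, n :: ns) :: K) (P ++ [c]) v =
            pvRunB end_ graph ((f, ns) :: K) (P ++ [c]) v := by
          rw [pvRunB.eq_def]; simp [hv]
        rw [hL, ihns c v P K]
        simp [pvLoopA, hv]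
      · by_cases he : n = end_
        · have hvb : ¬ (PySem.Set.contains v n = true) := by simpa using hv
          have hL : pvRunB end_ graph ((f, n :: ns) :: K) (P ++ [c]) v =
              some ((P ++ [c]) ++ [n]) := by
            rw [pvRunB.eq_def]; dsimp only; rw [if_neg hvb, if_pos he]
          rw [hL]
          have hd : pvDfsA end_ graph f n v = (some [n], v) := by
            rw [pvDfsA.eq_def]; simp [he]
          rw [pvLoopA]
          rw [if_neg hvb, hd]
          simp
        · cases f with
          | zero =>
            have hL : pvRunB end_ graph ((0, n :: ns) :: K) (P ++ [c]) v =
                pvRunB end_ graph ((0, ns) :: K) (P ++ [c]) v := by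
              rw [pvRunB.eq_def]; simp [hv, he]
            rw [hL, ihns c v P K]
            have hd : pvDfsA end_ graph 0 n v = (none, v) := by
              rw [pvDfsA.eq_def]; simp [he]
            rw [pvLoopA]
            simp [hv, hd]
          | succ f' =>
            have hvb : ¬ (PySem.Set.contains v n = true) := by simpa using hv
            have hL : pvRunB end_ graph ((f' + 1, n :: ns) :: K) (P ++ [c]) v =
                pvRunB end_ graph ((f', pvAdj graph n) :: (f' + 1, ns) :: K)
                  ((P ++ [c]) ++ [n]) (PySem.Set.add v n) := by
              rw [pvRunB.eq_def]; simp [hv, he]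
            rw [hL, ihf f' (by omega) (pvAdj graph n) n (PySem.Set.add v n)
                  (P ++ [c]) ((f' + 1, ns) :: K)]
            have hd : pvDfsA end_ graph (f' + 1) n v =
                pvLoopA (pvDfsA end_ graph f') (pvAdj graph n) n (PySem.Set.add v n) := by
              rw [pvDfsA.eq_def]; simp [he]
            conv_rhs => rw [pvLoopA]
            rw [if_neg hvb, hd]
            rcases hres : pvLoopA (pvDfsA end_ graph f') (pvAdj graph n) n
                (PySem.Set.add v n) with ⟨r, v'⟩
            cases r with
            | some q => simp
            | none => simp [ihns]

-- ===== VERDICT (by name: the statement is the Claim_ definition above) =====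
theorem path_search_spec : Claim_equal_path_search := by
  intro start end_ graph _
  unfold Spec_path_search path_search path_search_alt
  by_cases h : start = end_
  · rw [pvDfsA]; simp [h]
  · rw [pvDfsA]
    simp only [h, ite_false]
    rw [show ([start] : List Int) = [] ++ [start] from rfl,
        pvSim end_ graph (pvFuel graph) (pvAdj graph start) start
          (PySem.Set.add PySem.Set.empty start) [] []]
    rcases hres : pvLoopA (pvDfsA end_ graph (pvFuel graph)) (pvAdj graph start) start
        (PySem.Set.add PySem.Set.empty start) with ⟨r, v'⟩
    cases r with
    | some q => simp
    | none =>
      have hR : pvRunB end_ graph [] ([] : List Int) v' = none := by rw [pvRunB.eq_def]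
      simp [hR]
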